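-- pv_equiv track=rewrite | github.com/mautorresp/Teleport | teleport_math_runner.py | leb_len_u
-- ===== SOURCE A (Python) =====
-- def leb_len_u(n: int) -> int:  # unsigned LEB128 length in bytes
--     assert n >= 0
--     if n == 0: return 1
--     c = 0
--     while n:
--         n >>= 7
--         c += 1
--     return c
-- ===== SOURCE B (Python) =====
-- def leb_len_u(n: int) -> int:  # unsigned LEB128 length in bytes
--     assert n >= 0
--     if n == 0:
--         return 1
--     return (n.bit_length() + 6) // 7
-- ===== Notes on version B (the rewrite author's own statement) =====
-- stated objective: alternative
-- what changed: Replaced the per-chunk shift-and-count while-loop with the closed form ceil(bit_length/7) computed as (n.bit_length()+6)//7 in O(1).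
import Mathlib
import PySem

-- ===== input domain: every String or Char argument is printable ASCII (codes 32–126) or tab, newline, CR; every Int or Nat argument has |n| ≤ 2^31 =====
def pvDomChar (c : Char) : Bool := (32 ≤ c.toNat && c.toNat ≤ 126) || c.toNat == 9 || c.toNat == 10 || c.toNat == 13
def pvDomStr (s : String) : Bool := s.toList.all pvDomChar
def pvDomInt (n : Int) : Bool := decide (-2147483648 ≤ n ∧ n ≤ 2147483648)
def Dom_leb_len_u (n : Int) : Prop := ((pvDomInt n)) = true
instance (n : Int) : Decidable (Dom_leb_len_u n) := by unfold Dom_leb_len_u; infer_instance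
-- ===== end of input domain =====

-- B replaces A's shift-and-count loop by the closed form (bit_length + 6) // 7; equivalence proved for n ≥ 0 (A asserts n >= 0).


-- ===== PORT A =====
-- the while-loop: while n: n >>= 7; c += 1  (n ≥ 0, modelled on Nat; n >>> 7 = n // 128)
def lebLoopA (n : Nat) (c : Int) : Int :=
  if n = 0 then c else lebLoopA (n >>> 7) (c + 1)
  decreasing_by simp only [Nat.shiftRight_eq_div_pow]; omega

def leb_len_u (n : Int) : Int :=
  -- assert n >= 0: inputs n < 0 raise AssertionError, excluded by Pre_; value there is irrelevant
  if n = 0 then 1 else lebLoopA n.toNat 0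

-- ===== PORT B =====
-- Python's int.bit_length() for n ≥ 0
def pyBitLength (n : Nat) : Nat :=
  if n = 0 then 0 else pyBitLength (n / 2) + 1
  decreasing_by omega

def leb_len_u_alt (n : Int) : Int :=
  if n = 0 then 1 else PySem.Int.floordiv ((pyBitLength n.toNat : Int) + 6) 7

-- ===== PRECONDITION & SPEC =====
-- A asserts n >= 0: on negative n Python raises AssertionError, so those inputs are outside Pre_.
def Pre_leb_len_u (n : Int) : Prop := 0 ≤ n
instance (n : Int) : Decidable (Pre_leb_len_u n) := by unfold Pre_leb_len_u; infer_instance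
def pvWitness_leb_len_u : Int := (300)
def Spec_leb_len_u (n : Int) (out : Int) : Prop := out = leb_len_u_alt n
instance (n : Int) (out : Int) : Decidable (Spec_leb_len_u n out) := by unfold Spec_leb_len_u; infer_instance

-- ===== CLAIM (what is proved, stated in full; the proofs are below) =====
def Claim_equal_leb_len_u : Prop := ∀ (n : Int), Dom_leb_len_u n → Pre_leb_len_u n → Spec_leb_len_u n (leb_len_u n)

-- ===== LEMMAS AND PROOFS =====
theorem lebLoopA_shift (n : Nat) (c : Int) :
    lebLoopA n c = c + lebLoopA n 0 := by
  induction n using Nat.strong_induction_on generalizing c with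
  | _ n ih =>
    by_cases h : n = 0
    · subst h; simp [lebLoopA]
    · have hlt : n >>> 7 < n := by
        simp only [Nat.shiftRight_eq_div_pow]; omega
      conv_lhs => rw [lebLoopA]
      conv_rhs => rw [lebLoopA]
      simp only [h, if_false]
      rw [ih _ hlt (c + 1), ih _ hlt (0 + 1)]
      ring

theorem pyBitLength_step (n : Nat) (h : n ≠ 0) :
    pyBitLength n = pyBitLength (n / 2) + 1 := by
  rw [pyBitLength]; simp [h]

theorem pyBitLength_le (k : Nat) : ∀ n : Nat, n < 2 ^ k → pyBitLength n ≤ k := by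
  induction k with
  | zero =>
    intro n h
    have : n = 0 := by omega
    rw [this, pyBitLength]; simp
  | succ k ih =>
    intro n h
    by_cases h0 : n = 0
    · rw [h0, pyBitLength]; simp
    · rw [pyBitLength_step n h0]
      have h2 : 2 ^ (k + 1) = 2 * 2 ^ k := by ring
      have : n / 2 < 2 ^ k := by omega
      exact Nat.succ_le_succ (ih _ this)

theorem pyBitLength_pos (n : Nat) (h : n ≠ 0) : 1 ≤ pyBitLength n := by
  rw [pyBitLength]; simp [h]

theorem pyBitLength_div (n : Nat) (h : 128 ≤ n) :
    pyBitLength n = pyBitLength (n / 128) + 7 := by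
  rw [pyBitLength_step n (by omega), pyBitLength_step (n / 2) (by omega),
      pyBitLength_step (n / 2 / 2) (by omega), pyBitLength_step (n / 2 / 2 / 2) (by omega),
      pyBitLength_step (n / 2 / 2 / 2 / 2) (by omega),
      pyBitLength_step (n / 2 / 2 / 2 / 2 / 2) (by omega),
      pyBitLength_step (n / 2 / 2 / 2 / 2 / 2 / 2) (by omega)]
  have e : n / 2 / 2 / 2 / 2 / 2 / 2 / 2 = n / 128 := by omega
  rw [e]

theorem loop_closed (n : Nat) (h : n ≠ 0) :
    lebLoopA n 0 = ((pyBitLength n + 6) / 7 : Nat) := by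
  induction n using Nat.strong_induction_on with
  | _ n ih =>
    rw [lebLoopA]
    simp only [h, if_false]
    by_cases h128 : n < 128
    · have hz : n >>> 7 = 0 := by simp only [Nat.shiftRight_eq_div_pow]; omega
      rw [hz, lebLoopA]
      have b1 := pyBitLength_pos n h
      have b7 := pyBitLength_le 7 n (by omega)
      have : (pyBitLength n + 6) / 7 = 1 := by omega
      rw [this]; simp
    · have hdiv : n >>> 7 = n / 128 := by
        simp only [Nat.shiftRight_eq_div_pow]
      have hlt : n >>> 7 < n := by simp only [Nat.shiftRight_eq_div_pow]; omega
      have hne : n >>> 7 ≠ 0 := by rw [hdiv]; omega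
      rw [lebLoopA_shift, ih _ hlt hne, hdiv, pyBitLength_div n (by omega)]
      have hb := pyBitLength_pos (n / 128) (by omega)
      have h7 : (pyBitLength (n / 128) + 7 + 6) / 7 = (pyBitLength (n / 128) + 6) / 7 + 1 := by
        omega
      rw [h7]
      push_cast
      ring

-- ===== VERDICT (by name: the statement is the Claim_ definition above) =====
theorem leb_len_u_spec : Claim_equal_leb_len_u := by
  intro n _ hpre
  unfold Spec_leb_len_u leb_len_u leb_len_u_alt
  by_cases h0 : n = 0
  · simp [h0]
  · have hn : n.toNat ≠ 0 := by
      unfold Pre_leb_len_u at hpre; omega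
    simp only [h0, if_false]
    rw [loop_closed n.toNat hn,
        show PySem.Int.floordiv ((pyBitLength n.toNat : Int) + 6) 7
            = ((pyBitLength n.toNat : Int) + 6) / 7 by
          simp [PySem.Int.floordiv, Int.fdiv_eq_ediv],
        Int.natCast_div]
    push_cast
    ring
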